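-- pv_equiv track=rewrite | github.com/JulianFX27/quant-research-engine | scripts/run_batch.py | _compute_dataset_compat
-- ===== SOURCE A (Python) =====
-- from typing import Any, Dict, List, Optional
--
-- def _norm_fp8(x: Any) -> Optional[str]:
--     if x is None:
--         return None
--     s = str(x).strip()
--     return s if s else None
--
-- def _compute_dataset_compat(rows: List[Dict[str, Any]]) -> str:
--     """
--     Dataset compatibility for the batch.
--     - OK: all non-null dataset_fp8 values are identical and at least one exists
--     - MIXED: more than one distinct non-null dataset_fp8 exists
--     - UNKNOWN: no dataset_fp8 available at all
--     """
--     fps: List[str] = []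
--     for r in rows:
--         fp = _norm_fp8(r.get("dataset_fp8"))
--         if fp:
--             fps.append(fp)
--     uniq = sorted(set(fps))
--     if len(uniq) == 0:
--         return "UNKNOWN"
--     if len(uniq) == 1:
--         return "OK"
--     return "MIXED"
-- ===== SOURCE B (Python) =====
-- from typing import Any, Dict, List, Optional
--
-- def _norm_fp8(x: Any) -> Optional[str]:
--     if x is None:
--         return None
--     s = str(x).strip()
--     return s if s else None
--
-- def _compute_dataset_compat(rows: List[Dict[str, Any]]) -> str:
--     seen: Optional[str] = None
--     for r in rows:
--         fp = _norm_fp8(r.get("dataset_fp8"))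
--         if not fp:
--             continue
--         if seen is None:
--             seen = fp
--         elif fp != seen:
--             return "MIXED"
--     return "UNKNOWN" if seen is None else "OK"
-- ===== Notes on version B (the rewrite author's own statement) =====
-- stated objective: simpler
-- what changed: Replaces the collect-all-list + set + sorted + count-distinct pipeline with a single pass holding one scalar 'seen' fingerprint, returning MIXED early on the first mismatch and deciding OK/UNKNOWN by whether any non-null fingerprint was ever seen.
import Mathlib
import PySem

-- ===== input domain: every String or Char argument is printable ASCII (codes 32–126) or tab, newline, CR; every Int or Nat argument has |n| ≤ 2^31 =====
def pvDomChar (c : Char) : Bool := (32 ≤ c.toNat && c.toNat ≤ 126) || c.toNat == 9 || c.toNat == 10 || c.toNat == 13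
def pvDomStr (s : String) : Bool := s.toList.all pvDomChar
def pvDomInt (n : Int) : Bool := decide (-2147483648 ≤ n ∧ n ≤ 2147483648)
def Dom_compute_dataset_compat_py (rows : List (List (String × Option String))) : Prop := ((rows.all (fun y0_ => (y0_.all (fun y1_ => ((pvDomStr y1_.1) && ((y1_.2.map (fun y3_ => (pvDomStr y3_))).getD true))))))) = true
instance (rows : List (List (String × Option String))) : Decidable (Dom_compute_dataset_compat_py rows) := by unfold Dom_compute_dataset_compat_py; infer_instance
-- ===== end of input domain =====

-- B replaces A's collect-list + set + sorted distinct-count pipeline with a single-pass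
-- scalar comparison that returns "MIXED" early on the first mismatching fingerprint (simpler).


-- ===== PORT A =====
-- shared module helper _norm_fp8 (x is Optional[str] here; str(x) of a str is itself)
def normFp8 (x : Option String) : Option String :=
  match x with
  | none => none
  | some v =>
    let s := PySem.Str.strip v
    if s = "" then none else some s

def compute_dataset_compat_py (rows : List (List (String × Option String))) : String :=
  let fps : List String := rows.foldl (fun fps r =>
    match normFp8 (PySem.Dict.getD (PySem.Dict.mk r) "dataset_fp8" none) with
    | some fp => fps ++ [fp]
    | none => fps) []
  let uniq := PySem.List.sorted (PySem.Set.ofList fps) (fun x => x) false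
  if uniq.length = 0 then "UNKNOWN"
  else if uniq.length = 1 then "OK"
  else "MIXED"

-- ===== PORT B =====
def altLoop (seen : Option String) : List (List (String × Option String)) → String
  | [] => match seen with | none => "UNKNOWN" | some _ => "OK"
  | r :: rest =>
    match normFp8 (PySem.Dict.getD (PySem.Dict.mk r) "dataset_fp8" none) with
    | none => altLoop seen rest
    | some fp =>
      match seen with
      | none => altLoop (some fp) rest
      | some s => if fp ≠ s then "MIXED" else altLoop seen rest

def compute_dataset_compat_py_alt (rows : List (List (String × Option String))) : String :=
  altLoop none rows

-- ===== PRECONDITION & SPEC =====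
def Spec_compute_dataset_compat_py (rows : List (List (String × Option String))) (out : String) : Prop := out = compute_dataset_compat_py_alt rows
instance (rows : List (List (String × Option String))) (out : String) : Decidable (Spec_compute_dataset_compat_py rows out) := by unfold Spec_compute_dataset_compat_py; infer_instance

-- ===== CLAIM (what is proved, stated in full; the proofs are below) =====
def Claim_equal_compute_dataset_compat_py : Prop := ∀ (rows : List (List (String × Option String))), Dom_compute_dataset_compat_py rows → Spec_compute_dataset_compat_py rows (compute_dataset_compat_py rows)

-- ===== LEMMAS AND PROOFS =====

-- the list of normalized non-null fingerprints, as a filterMap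
def fpsOf (rows : List (List (String × Option String))) : List String :=
  rows.filterMap (fun r => normFp8 (PySem.Dict.getD (PySem.Dict.mk r) "dataset_fp8" none))

lemma fpsOf_cons (r : List (String × Option String)) (rest : List (List (String × Option String))) :
    fpsOf (r :: rest) =
      match normFp8 (PySem.Dict.getD (PySem.Dict.mk r) "dataset_fp8" none) with
      | some fp => fp :: fpsOf rest
      | none => fpsOf rest := by
  cases h : normFp8 (PySem.Dict.getD (PySem.Dict.mk r) "dataset_fp8" none) <;>
    simp [fpsOf, h]

lemma foldl_fps (rows : List (List (String × Option String))) (acc : List String) :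
    rows.foldl (fun fps r =>
      match normFp8 (PySem.Dict.getD (PySem.Dict.mk r) "dataset_fp8" none) with
      | some fp => fps ++ [fp]
      | none => fps) acc = acc ++ fpsOf rows := by
  induction rows generalizing acc with
  | nil => simp [fpsOf]
  | cons r rest ih =>
    rw [List.foldl_cons, fpsOf_cons]
    cases h : normFp8 (PySem.Dict.getD (PySem.Dict.mk r) "dataset_fp8" none) with
    | none => simp [ih acc]
    | some fp => simp [ih (acc ++ [fp])]

-- B's loop, expressed over the fingerprint list only
def loopS (seen : Option String) : List String → String
  | [] => match seen with | none => "UNKNOWN" | some _ => "OK"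
  | fp :: t =>
    match seen with
    | none => loopS (some fp) t
    | some s => if fp ≠ s then "MIXED" else loopS seen t

lemma altLoop_eq_loopS (rows : List (List (String × Option String))) (seen : Option String) :
    altLoop seen rows = loopS seen (fpsOf rows) := by
  induction rows generalizing seen with
  | nil => cases seen <;> simp [altLoop, loopS, fpsOf]
  | cons r rest ih =>
    rw [fpsOf_cons]
    cases h : normFp8 (PySem.Dict.getD (PySem.Dict.mk r) "dataset_fp8" none) with
    | none => simp [altLoop, h, ih seen]
    | some fp =>
      cases seen with
      | none => simp [altLoop, loopS, h, ih (some fp)]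
      | some s =>
        by_cases hfp : fp = s <;> simp [altLoop, loopS, h, hfp, ih]

lemma loopS_some (t : List String) (a : String) :
    loopS (some a) t = if t.all (· = a) then "OK" else "MIXED" := by
  induction t with
  | nil => rfl
  | cons b t' ih =>
    by_cases hb : b = a <;> simp [loopS, hb, ih]

lemma ofList_all_eq (a : String) (t : List String) (h : t.all (· = a)) :
    PySem.Set.ofList (a :: t) = [a] := by
  have key : ∀ s : List String, (∀ x ∈ s, x = a) → s.foldl PySem.Set.add [a] = [a] := by
    intro s
    induction s with
    | nil => simp
    | cons x s' ih =>
      intro hx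
      have hxa : x = a := hx x (by simp)
      have hadd : PySem.Set.add [a] x = [a] := by
        simp [PySem.Set.add, PySem.Set.contains, hxa]
      simpa [List.foldl, hadd] using ih (fun y hy => hx y (by simp [hy]))
  have hall : ∀ x ∈ t, x = a := by simpa [List.all_eq_true] using h
  simpa [PySem.Set.ofList_eq_foldl, List.foldl, PySem.Set.add, PySem.Set.empty] using key t hall

lemma two_le_ofList_length (fps : List String) (a b : String)
    (ha : a ∈ fps) (hb : b ∈ fps) (hab : a ≠ b) :
    2 ≤ (PySem.Set.ofList fps).length := by
  have ha' : a ∈ PySem.Set.ofList fps := (PySem.Set.mem_ofList fps a).2 ha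
  have hb' : b ∈ PySem.Set.ofList fps := (PySem.Set.mem_ofList fps b).2 hb
  have hsub : ({a, b} : Finset String) ⊆ (PySem.Set.ofList fps).toFinset := by
    intro x hx
    simp only [Finset.mem_insert, Finset.mem_singleton] at hx
    rcases hx with rfl | rfl <;> simp [ha', hb']
  calc 2 = ({a, b} : Finset String).card := (Finset.card_pair hab).symm
    _ ≤ (PySem.Set.ofList fps).toFinset.card := Finset.card_le_card hsub
    _ ≤ (PySem.Set.ofList fps).length := (PySem.Set.ofList fps).toFinset_card_le

lemma A_eq_loopS (fps : List String) :
    (let uniq := PySem.List.sorted (PySem.Set.ofList fps) (fun x => x) false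
     if uniq.length = 0 then "UNKNOWN"
     else if uniq.length = 1 then "OK"
     else "MIXED") = loopS none fps := by
  cases fps with
  | nil => rfl
  | cons a t =>
    simp only [loopS, loopS_some]
    by_cases h : t.all (· = a)
    · have h1 : PySem.Set.ofList (a :: t) = [a] := ofList_all_eq a t h
      simp [h1, h, PySem.List.sorted, PySem.List.insertBy]
    · obtain ⟨b, hb, hba⟩ : ∃ b ∈ t, ¬ b = a := by
        simpa [List.all_eq_true] using h
      have h2 : 2 ≤ (PySem.Set.ofList (a :: t)).length :=
        two_le_ofList_length (a :: t) a b (by simp) (by simp [hb]) (fun he => hba he.symm)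
      have hlen : (PySem.List.sorted (PySem.Set.ofList (a :: t)) (fun x => x) false).length
          = (PySem.Set.ofList (a :: t)).length := PySem.List.length_sorted ..
      have hz : ¬ (PySem.Set.ofList (a :: t)).length = 0 := by omega
      have h1 : ¬ (PySem.Set.ofList (a :: t)).length = 1 := by omega
      simp [hlen, hz, h1, h]

-- ===== VERDICT (by name: the statement is the Claim_ definition above) =====
theorem compute_dataset_compat_py_spec : Claim_equal_compute_dataset_compat_py := by
  intro rows _
  unfold Spec_compute_dataset_compat_py compute_dataset_compat_py compute_dataset_compat_py_alt
  rw [foldl_fps rows [], altLoop_eq_loopS]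
  simpa using A_eq_loopS (fpsOf rows)
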